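-- pv_equiv track=rewrite | github.com/tangchichi-bit/baccarat_prediction_system_web | app/models/formula_calculator.py | calculate_advantage_value
-- ===== SOURCE A (Python) =====
-- def calculate_advantage_value(points):
--     """計算優勢牌值"""
--     advantage = 0
--
--     for point in points:
--         if point in [1, 4, 5, 7, 8]:
--             advantage += 2
--         elif point in [2, 3]:
--             advantage -= 3
--         elif point in [6, 9]:
--             advantage -= 5
--
--     return advantage
-- ===== SOURCE B (Python) =====
-- from collections import Counter
--
-- def calculate_advantage_value(points):
--     c = Counter(points)
--     return (2 * (c[1] + c[4] + c[5] + c[7] + c[8])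
--             - 3 * (c[2] + c[3])
--             - 5 * (c[6] + c[9]))
-- ===== Notes on version B (the rewrite author's own statement) =====
-- stated objective: idiomatic
-- what changed: Replaces the per-element branch-and-accumulate loop with a Counter frequency table built once and one closed arithmetic expression over the group counts.
import Mathlib
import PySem

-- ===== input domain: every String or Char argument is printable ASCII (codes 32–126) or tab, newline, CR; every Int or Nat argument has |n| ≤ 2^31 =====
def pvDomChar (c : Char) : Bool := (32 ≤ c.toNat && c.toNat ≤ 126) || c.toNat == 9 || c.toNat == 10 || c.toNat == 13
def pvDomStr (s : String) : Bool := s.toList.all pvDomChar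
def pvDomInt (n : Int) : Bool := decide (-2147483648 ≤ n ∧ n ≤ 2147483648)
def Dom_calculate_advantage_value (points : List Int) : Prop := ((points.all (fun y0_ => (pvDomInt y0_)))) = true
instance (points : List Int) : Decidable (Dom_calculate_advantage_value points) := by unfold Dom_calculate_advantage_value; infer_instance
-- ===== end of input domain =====

-- B replaces A's per-element branch-and-accumulate loop by a Counter (frequency table)
-- built once, combined in one closed arithmetic expression over the group counts (idiomatic).

-- ===== PORT A =====
def calculate_advantage_value (points : List Int) : Int :=
  points.foldl (fun advantage point =>
    if point ∈ ([1, 4, 5, 7, 8] : List Int) then advantage + 2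
    else if point ∈ ([2, 3] : List Int) then advantage - 3
    else if point ∈ ([6, 9] : List Int) then advantage - 5
    else advantage) 0

-- ===== PORT B =====
def calculate_advantage_value_alt (points : List Int) : Int :=
  let c := PySem.Dict.counter points
  2 * (c.getD 1 0 + c.getD 4 0 + c.getD 5 0 + c.getD 7 0 + c.getD 8 0)
    - 3 * (c.getD 2 0 + c.getD 3 0)
    - 5 * (c.getD 6 0 + c.getD 9 0)

-- ===== PRECONDITION & SPEC =====
def Spec_calculate_advantage_value (points : List Int) (out : Int) : Prop := out = calculate_advantage_value_alt points
instance (points : List Int) (out : Int) : Decidable (Spec_calculate_advantage_value points out) := by unfold Spec_calculate_advantage_value; infer_instance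

-- ===== CLAIM (what is proved, stated in full; the proofs are below) =====
def Claim_equal_calculate_advantage_value : Prop := ∀ (points : List Int), Dom_calculate_advantage_value points → Spec_calculate_advantage_value points (calculate_advantage_value points)

-- ===== LEMMAS AND PROOFS =====

-- A's loop unrolled into per-value counts: the accumulator after the whole loop equals
-- the closed combination of counts (proved by induction with a general start value).
theorem calc_adv_foldl_counts (points : List Int) (a : Int) :
    points.foldl (fun advantage point =>
      if point ∈ ([1, 4, 5, 7, 8] : List Int) then advantage + 2
      else if point ∈ ([2, 3] : List Int) then advantage - 3
      else if point ∈ ([6, 9] : List Int) then advantage - 5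
      else advantage) a
    = a + 2 * ((points.count 1 : Int) + points.count 4 + points.count 5 + points.count 7 + points.count 8)
        - 3 * ((points.count 2 : Int) + points.count 3)
        - 5 * ((points.count 6 : Int) + points.count 9) := by
  induction points generalizing a with
  | nil => simp
  | cons x xs ih =>
    simp only [List.foldl_cons, List.count_cons, ih]
    by_cases h1 : x ∈ ([1, 4, 5, 7, 8] : List Int)
    · simp only [if_pos h1]
      fin_cases h1 <;> simp <;> ring
    · simp only [if_neg h1]
      by_cases h2 : x ∈ ([2, 3] : List Int)
      · simp only [if_pos h2]
        fin_cases h2 <;> simp_all <;> ring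
      · simp only [if_neg h2]
        by_cases h3 : x ∈ ([6, 9] : List Int)
        · simp only [if_pos h3]
          fin_cases h3 <;> simp_all <;> ring
        · simp only [if_neg h3]
          simp_all

-- ===== VERDICT (by name: the statement is the Claim_ definition above) =====
theorem calculate_advantage_value_spec : Claim_equal_calculate_advantage_value := by
  intro points _
  unfold Spec_calculate_advantage_value calculate_advantage_value_alt calculate_advantage_value
  simp only [PySem.Dict.getD_counter, calc_adv_foldl_counts]
  ring
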